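-- pv_equiv track=rewrite | github.com/John728/nanoRTS | generateRTS.py | generate_fixed_RTS
-- ===== SOURCE A (Python) =====
-- def generate_fixed_RTS(num_samples, transition_rate, num_states = 2):
--     # Set the initial state
--     current_state = 0
--     # Generate the RTS
--     rts = []
--     for i in range(num_samples):
--         # Append the current state to the RTS
--         rts.append(current_state)
--         # Transition to the other state after a fixed number of samples
--         if (i+1) % transition_rate == 0:
--             current_state = (current_state + 1) % num_states
--     return rts
-- ===== SOURCE B (Python) =====
-- def generate_fixed_RTS(num_samples, transition_rate, num_states=2):
--     # State at sample i is the number of completed transitions, i // transition_rate,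
--     # reduced modulo the number of states.
--     return [(i // transition_rate) % num_states for i in range(num_samples)]
-- ===== Notes on version B (the rewrite author's own statement) =====
-- stated objective: simpler
-- what changed: Replaces the stateful loop (running state, branch on (i+1)%rate) with a branch-free closed-form list comprehension (i // rate) % num_states; Pre_ excludes non-positive transition_rate (A raises at rate 0, and for negative rates A's values are accidents of Python's modulo sign for a parameter that is a positive period) and num_states = 0 with positive num_samples (A raises once a transition fires and otherwise returns only an accidental all-zero prefix).
-- outside the precondition, e.g. on generate_fixed_RTS(4, -2, 2): A returns [0, 0, 1, 1], B returns [0, 1, 1, 0]; on generate_fixed_RTS(1, 3, 0): A returns [0], B raises ZeroDivisionError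
import Mathlib
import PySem

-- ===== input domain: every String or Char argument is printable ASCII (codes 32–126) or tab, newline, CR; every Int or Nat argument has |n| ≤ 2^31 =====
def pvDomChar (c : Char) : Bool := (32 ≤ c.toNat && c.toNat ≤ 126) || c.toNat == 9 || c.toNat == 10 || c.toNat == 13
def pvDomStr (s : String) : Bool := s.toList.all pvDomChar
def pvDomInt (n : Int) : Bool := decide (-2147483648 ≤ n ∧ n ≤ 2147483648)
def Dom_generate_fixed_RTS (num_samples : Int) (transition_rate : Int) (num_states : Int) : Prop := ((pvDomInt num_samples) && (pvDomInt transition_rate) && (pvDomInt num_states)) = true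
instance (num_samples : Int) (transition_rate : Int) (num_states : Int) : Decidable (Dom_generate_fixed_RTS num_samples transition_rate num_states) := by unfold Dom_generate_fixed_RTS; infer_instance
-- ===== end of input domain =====

-- B replaces A's stateful loop with a branch-free closed form (i // rate) % num_states; objective: simpler.

-- ===== PORT A =====
def generate_fixed_RTS (num_samples : Int) (transition_rate : Int) (num_states : Int) : List Int :=
  ((PySem.List.pyRange 0 num_samples 1).foldl
    (fun (st : Int × List Int) i =>
      let rts := st.2 ++ [st.1]
      let cs := if PySem.Int.mod (i + 1) transition_rate = 0
                then PySem.Int.mod (st.1 + 1) num_states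
                else st.1
      (cs, rts))
    (0, [])).2

-- ===== PORT B =====
def generate_fixed_RTS_alt (num_samples : Int) (transition_rate : Int) (num_states : Int) : List Int :=
  (PySem.List.pyRange 0 num_samples 1).map
    (fun i => PySem.Int.mod (PySem.Int.floordiv i transition_rate) num_states)

-- ===== PRECONDITION & SPEC =====
-- Pre_ excludes non-positive transition_rate with positive num_samples (A raises ZeroDivisionError at
-- rate 0, and for negative rates — a meaningless period — A's values are accidents of Python's modulo
-- sign), and num_states = 0 with positive num_samples (A raises as soon as a transition fires and
-- otherwise returns only an accidental all-zero prefix, while B's closed form divides by num_states).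
def Pre_generate_fixed_RTS (num_samples : Int) (transition_rate : Int) (num_states : Int) : Prop :=
  num_samples ≤ 0 ∨ (0 < transition_rate ∧ num_states ≠ 0)
instance (num_samples : Int) (transition_rate : Int) (num_states : Int) : Decidable (Pre_generate_fixed_RTS num_samples transition_rate num_states) := by unfold Pre_generate_fixed_RTS; infer_instance
def pvWitness_generate_fixed_RTS : Int × Int × Int := (6, 2, 3)
def Spec_generate_fixed_RTS (num_samples : Int) (transition_rate : Int) (num_states : Int) (out : List Int) : Prop := out = generate_fixed_RTS_alt num_samples transition_rate num_states
instance (num_samples : Int) (transition_rate : Int) (num_states : Int) (out : List Int) : Decidable (Spec_generate_fixed_RTS num_samples transition_rate num_states out) := by unfold Spec_generate_fixed_RTS; infer_instance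

-- ===== CLAIM (what is proved, stated in full; the proofs are below) =====
def Claim_equal_generate_fixed_RTS : Prop := ∀ (num_samples : Int) (transition_rate : Int) (num_states : Int), Dom_generate_fixed_RTS num_samples transition_rate num_states → Pre_generate_fixed_RTS num_samples transition_rate num_states → Spec_generate_fixed_RTS num_samples transition_rate num_states (generate_fixed_RTS num_samples transition_rate num_states)

-- ===== LEMMAS AND PROOFS =====

-- adding 1 commutes with a prior floor-mod reduction
lemma pv_fmod_add_one (a ns : Int) :
    Int.fmod (Int.fmod a ns + 1) ns = Int.fmod (a + 1) ns := by
  have h : Int.fmod a ns + 1 = (a + 1) + (-(Int.fdiv a ns)) * ns := by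
    have := Int.fmod_add_mul_fdiv a ns
    ring_nf
    linarith
  rw [h, Int.add_mul_fmod_self_right]

lemma pv_fdiv_succ_dvd (k p : Int) (hp : 0 < p) (hd : p ∣ (k + 1)) :
    PySem.Int.floordiv (k + 1) p = PySem.Int.floordiv k p + 1 := by
  obtain ⟨m, hm⟩ := hd
  have hq : PySem.Int.floordiv k p * p ≤ k ∧ k < (PySem.Int.floordiv k p + 1) * p :=
    (PySem.Int.floordiv_eq_iff_of_pos hp).mp rfl
  set q := PySem.Int.floordiv k p with hqdef
  have hqm : q < m := by
    have h1 : q * p < m * p := by nlinarith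
    exact lt_of_mul_lt_mul_right h1 (le_of_lt hp)
  refine (PySem.Int.floordiv_eq_iff_of_pos hp).mpr ⟨?_, ?_⟩
  · have : (q + 1) * p ≤ m * p := by nlinarith
    nlinarith
  · nlinarith

lemma pv_fdiv_succ_not_dvd (k p : Int) (hp : 0 < p) (hnd : ¬ p ∣ (k + 1)) :
    PySem.Int.floordiv (k + 1) p = PySem.Int.floordiv k p := by
  have hq : PySem.Int.floordiv k p * p ≤ k ∧ k < (PySem.Int.floordiv k p + 1) * p :=
    (PySem.Int.floordiv_eq_iff_of_pos hp).mp rfl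
  set q := PySem.Int.floordiv k p with hqdef
  refine (PySem.Int.floordiv_eq_iff_of_pos hp).mpr ⟨by linarith [hq.1], ?_⟩
  rcases lt_or_eq_of_le (by linarith [hq.2] : k + 1 ≤ (q + 1) * p) with h | h
  · exact h
  · exact absurd ⟨q + 1, by linarith [h]⟩ hnd

-- loop invariant for A: the running state equals the closed form
lemma pv_loop_inv (tr ns : Int) (hp : 0 < tr) (_hns : ns ≠ 0) (k : Nat) :
    (PySem.List.pyRange 0 (k : Int) 1).foldl
      (fun (st : Int × List Int) i =>
        let rts := st.2 ++ [st.1]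
        let cs := if PySem.Int.mod (i + 1) tr = 0
                  then PySem.Int.mod (st.1 + 1) ns
                  else st.1
        (cs, rts))
      (0, [])
    = (PySem.Int.mod (PySem.Int.floordiv (k : Int) tr) ns,
       (PySem.List.pyRange 0 (k : Int) 1).map
         (fun i => PySem.Int.mod (PySem.Int.floordiv i tr) ns)) := by
  induction k with
  | zero =>
      simp [PySem.List.pyRange_one_eq_nil (le_refl (0 : Int)),
            PySem.Int.floordiv, PySem.Int.mod]
  | succ n ih =>
      have hcast : ((n + 1 : Nat) : Int) = (n : Int) + 1 := by push_cast; ring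
      rw [hcast, PySem.List.pyRange_one_succ_right (by positivity),
          List.foldl_append, List.map_append, ih]
      simp only [List.foldl_cons, List.foldl_nil, List.map_cons, List.map_nil]
      have hdvd_iff : PySem.Int.mod ((n : Int) + 1) tr = 0 ↔ tr ∣ ((n : Int) + 1) :=
        PySem.Int.mod_eq_zero_iff_dvd _ _
      by_cases hd : tr ∣ ((n : Int) + 1)
      · rw [if_pos (hdvd_iff.mpr hd)]
        simp only [Prod.mk.injEq]
        refine ⟨?_, trivial⟩
        show PySem.Int.mod (PySem.Int.mod (PySem.Int.floordiv (n : Int) tr) ns + 1) ns = _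
        rw [pv_fdiv_succ_dvd (n : Int) tr hp hd]
        exact pv_fmod_add_one (PySem.Int.floordiv (n : Int) tr) ns
      · rw [if_neg (fun h => hd (hdvd_iff.mp h))]
        simp only [Prod.mk.injEq]
        exact ⟨by rw [pv_fdiv_succ_not_dvd (n : Int) tr hp hd], trivial⟩

-- ===== VERDICT (by name: the statement is the Claim_ definition above) =====
theorem generate_fixed_RTS_spec : Claim_equal_generate_fixed_RTS := by
  intro n tr ns _ hpre
  unfold Spec_generate_fixed_RTS generate_fixed_RTS generate_fixed_RTS_alt
  by_cases hn : n ≤ 0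
  · rw [PySem.List.pyRange_one_eq_nil hn]
    simp
  · rcases hpre with hle | ⟨htr, hns⟩
    · omega
    · obtain ⟨k, hk⟩ : ∃ k : Nat, n = (k : Int) := ⟨n.toNat, by omega⟩
      subst hk
      rw [pv_loop_inv tr ns htr hns k]
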